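-- pv_equiv track=rewrite | github.com/Codinma/Practise-Agent-Kits | publisher/mahaoran—publisher/xhs_publisher.py | _split_markdown_by_dash
-- ===== SOURCE A (Python) =====
-- from typing import List, Tuple
--
-- def _split_markdown_by_dash(text: str) -> List[str]:
--     """
--     把 year_XXXX_summary.md 用 '---' 分成多段。
--     如果文件里没有 '---'，就当成只有一段。
--     """
--     lines = text.splitlines()
--     parts: List[List[str]] = []
--     buf: List[str] = []
--
--     for line in lines:
--         if line.strip() == "---":
--             if buf:
--                 parts.append(buf)
--                 buf = []
--         else:
--             buf.append(line)
--
--     if buf: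
--         parts.append(buf)
--
--     if not parts:
--         return [text.strip()]
--
--     return ["\n".join(chunk).strip() for chunk in parts if "".join(chunk).strip()]
-- ===== SOURCE B (Python) =====
-- from typing import List
--
-- def _split_markdown_by_dash(text: str) -> List[str]:
--     # Staged: find every separator line's index, then slice the line list
--     # between consecutive separator positions -- no incremental buffering.
--     lines = text.splitlines()
--     seps = [i for i, line in enumerate(lines) if line.strip() == "---"]
--     bounds = [-1] + seps + [len(lines)]
--     segments = [lines[a + 1:b] for a, b in zip(bounds, bounds[1:])]
--     if all(not seg for seg in segments):
--         return [text.strip()]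
--     return ["\n".join(seg).strip() for seg in segments if "".join(seg).strip()]
-- ===== Notes on version B (the rewrite author's own statement) =====
-- stated objective: alternative
-- what changed: Replaced A's incremental buffer/flush loop with staged passes: collect every separator line's index, build a bounds list, and slice the line list between consecutive bounds, keeping the join/strip/filter and the fallback for all-separator input.
import Mathlib
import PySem

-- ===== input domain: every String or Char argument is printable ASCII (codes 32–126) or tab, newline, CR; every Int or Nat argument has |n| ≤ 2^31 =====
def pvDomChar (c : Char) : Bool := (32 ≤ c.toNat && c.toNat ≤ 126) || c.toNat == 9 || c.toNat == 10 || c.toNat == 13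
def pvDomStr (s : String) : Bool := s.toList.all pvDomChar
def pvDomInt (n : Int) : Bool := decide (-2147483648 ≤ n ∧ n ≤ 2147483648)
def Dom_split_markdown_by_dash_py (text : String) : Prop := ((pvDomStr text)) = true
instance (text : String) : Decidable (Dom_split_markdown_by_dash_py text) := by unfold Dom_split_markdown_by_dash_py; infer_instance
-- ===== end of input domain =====

-- B replaces A's incremental line-buffer loop with staged passes: find every
-- separator line's index, then slice the line list between consecutive
-- separator positions (objective: alternative decomposition).

-- ===== PORT A =====
-- `line.strip() == "---"` (A's separator test)
def pvSep (line : String) : Bool := PySem.Str.strip line == "---"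

-- the for-loop over `lines` carrying (parts, buf), plus the trailing `if buf:` flush
def pvLoopA : List String → List (List String) → List String → List (List String)
  | [], parts, buf => if buf = [] then parts else parts ++ [buf]
  | l :: ls, parts, buf =>
    if pvSep l then
      if buf = [] then pvLoopA ls parts [] else pvLoopA ls (parts ++ [buf]) []
    else pvLoopA ls parts (buf ++ [l])

def split_markdown_by_dash_py (text : String) : List String :=
  let lines := PySem.Str.splitlines text
  let parts := pvLoopA lines [] []
  if parts = [] then [PySem.Str.strip text]
  else (parts.filter (fun chunk => !(PySem.Str.strip (PySem.Str.join "" chunk) == ""))).map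
        (fun chunk => PySem.Str.strip (PySem.Str.join "\n" chunk))

-- ===== PORT B =====
-- B's staged passes: separator indices, bounds list, slices between
-- consecutive bounds (`[lines[a+1:b] for a, b in zip(bounds, bounds[1:])]`)
def pvSegsB (lines : List String) : List (List String) :=
  let seps := ((PySem.List.enumerate lines 0).filter
                (fun q => PySem.Str.strip q.2 == "---")).map (fun q => q.1)
  let bounds := (-1 : Int) :: (seps ++ [(lines.length : Int)])
  (bounds.zip bounds.tail).map (fun q => PySem.List.slice lines (some (q.1 + 1)) (some q.2))

def split_markdown_by_dash_py_alt (text : String) : List String :=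
  let lines := PySem.Str.splitlines text
  let segments := pvSegsB lines
  if segments.all (fun seg => seg.isEmpty) then [PySem.Str.strip text]
  else (segments.filter (fun g => !(PySem.Str.strip (PySem.Str.join "" g) == ""))).map
        (fun g => PySem.Str.strip (PySem.Str.join "\n" g))

-- ===== PRECONDITION & SPEC =====
def Spec_split_markdown_by_dash_py (text : String) (out : List String) : Prop := out = split_markdown_by_dash_py_alt text
instance (text : String) (out : List String) : Decidable (Spec_split_markdown_by_dash_py text out) := by unfold Spec_split_markdown_by_dash_py; infer_instance

-- ===== CLAIM =====
def Claim_equal_split_markdown_by_dash_py : Prop := ∀ (text : String), Dom_split_markdown_by_dash_py text → Spec_split_markdown_by_dash_py text (split_markdown_by_dash_py text)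

-- ===== LEMMAS AND PROOFS =====

-- the maximal runs of non-separator lines (proof-side normal form)
def pvGroups : List String → List (List String)
  | [] => []
  | l :: ls =>
    if pvSep l then pvGroups ls
    else (l :: ls.takeWhile (fun x => !pvSep x)) :: pvGroups (ls.dropWhile (fun x => !pvSep x))
termination_by ls => ls.length
decreasing_by
all_goals
  have := List.length_dropWhile_le (p := fun x => !pvSep x) (l := ls)
  simp at this ⊢ <;> omega

-- A's accumulator loop produces exactly the non-separator groups.
theorem pvLoopA_eq_groups (ls : List String) : ∀ (parts : List (List String)) (buf : List String),
    pvLoopA ls parts buf =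
      parts ++ (if buf = [] then pvGroups ls
                else (buf ++ ls.takeWhile (fun x => !pvSep x)) ::
                      pvGroups (ls.dropWhile (fun x => !pvSep x))) := by
  induction ls with
  | nil =>
    intro parts buf
    by_cases hb : buf = [] <;> simp [pvLoopA, pvGroups, hb]
  | cons l ls ih =>
    intro parts buf
    by_cases hs : pvSep l
    · by_cases hb : buf = [] <;>
        simp [pvLoopA, hs, hb, ih, pvGroups]
    · have hne : buf ++ [l] ≠ [] := by simp
      by_cases hb : buf = [] <;>
        simp [pvLoopA, hs, hb, ih, hne, pvGroups]

theorem pvLoopA_nil_nil (ls : List String) : pvLoopA ls [] [] = pvGroups ls := by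
  simpa using pvLoopA_eq_groups ls [] []

-- ---- B side: the staged slices compute List.splitOnP ----

-- zip-with-tail slicing, abstracted over the bounds list
def pvZS (xs : List String) (bs : List Int) : List (List String) :=
  (bs.zip bs.tail).map (fun q => PySem.List.slice xs (some (q.1 + 1)) (some q.2))

theorem pvZS_cons (xs : List String) (a b : Int) (rest : List Int) :
    pvZS xs (a :: b :: rest) =
      PySem.List.slice xs (some (a + 1)) (some b) :: pvZS xs (b :: rest) := rfl

theorem slice_cons_succ (x : String) (xs : List String) (a b : Int)
    (ha : 0 ≤ a) (hb : 0 ≤ b) :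
    PySem.List.slice (x :: xs) (some (a + 1)) (some (b + 1)) =
      PySem.List.slice xs (some a) (some b) := by
  rw [PySem.List.slice_toNat _ (by omega) (by omega),
      PySem.List.slice_toNat _ ha hb]
  have h1 : (a + 1).toNat = a.toNat + 1 := by omega
  rw [h1]
  simp only [List.drop_succ_cons]
  congr 1
  omega

theorem slice_zero_succ (x : String) (xs : List String) (b : Int) (hb : 0 ≤ b) :
    PySem.List.slice (x :: xs) (some 0) (some (b + 1)) =
      x :: PySem.List.slice xs (some 0) (some b) := by
  rw [PySem.List.slice_toNat _ le_rfl (by omega),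
      PySem.List.slice_toNat _ le_rfl hb]
  have h1 : (b + 1).toNat = b.toNat + 1 := by omega
  simp [h1]

theorem slice_zero_zero (xs : List String) :
    PySem.List.slice xs (some 0) (some 0) = [] := by
  rw [PySem.List.slice_toNat _ le_rfl le_rfl]
  simp

theorem pvZS_shift (l : String) (ls : List String) :
    ∀ (bs : List Int), (∀ x ∈ bs, -1 ≤ x) → (∀ x ∈ bs.tail, 0 ≤ x) →
      pvZS (l :: ls) (bs.map (· + 1)) = pvZS ls bs := by
  intro bs
  induction bs with
  | nil => intro _ _; rfl
  | cons a t ih =>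
    cases t with
    | nil => intro _ _; rfl
    | cons b r =>
      intro h1 h2
      have hb : (0:Int) ≤ b := h2 b (by simp)
      have ha : (-1:Int) ≤ a := h1 a (by simp)
      have hrec : pvZS (l :: ls) ((b :: r).map (· + 1)) = pvZS ls (b :: r) := by
        refine ih ?_ ?_
        · intro x hx
          rcases List.mem_cons.mp hx with h | h
          · omega
          · have := h2 x (List.mem_cons_of_mem _ h); omega
        · intro x hx
          exact h2 x (List.mem_cons_of_mem _ hx)
      simp only [List.map_cons] at hrec ⊢
      rw [pvZS_cons, pvZS_cons, hrec]
      congr 1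
      exact slice_cons_succ l ls (a + 1) b (by omega) hb

-- separator indices, with an arbitrary enumerate start
def pvSepsFrom (xs : List String) (s : Int) : List Int :=
  ((PySem.List.enumerate xs s).filter (fun q => PySem.Str.strip q.2 == "---")).map (fun q => q.1)

theorem pvSepsFrom_shift (xs : List String) : ∀ (s : Int),
    pvSepsFrom xs (s + 1) = (pvSepsFrom xs s).map (· + 1) := by
  induction xs with
  | nil => intro s; simp [pvSepsFrom, PySem.List.enumerate_nil]
  | cons x xs ih =>
    intro s
    have h2 : pvSepsFrom xs (s + 1 + 1) = (pvSepsFrom xs (s + 1)).map (· + 1) := ih (s + 1)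
    by_cases h : PySem.Str.strip x == "---" <;>
      simp only [pvSepsFrom, PySem.List.enumerate_cons, List.filter_cons, h, if_pos, if_neg,
        Bool.false_eq_true, ite_false, ite_true, List.map_cons] <;>
      simpa [pvSepsFrom] using h2

theorem pvSepsFrom_ge (xs : List String) : ∀ (s : Int), ∀ b ∈ pvSepsFrom xs s, s ≤ b := by
  induction xs with
  | nil => intro s b hb; simp [pvSepsFrom, PySem.List.enumerate_nil] at hb
  | cons x xs ih =>
    intro s b hb
    have h2 := ih (s + 1) b
    by_cases h : PySem.Str.strip x == "---" <;>
      simp only [pvSepsFrom, PySem.List.enumerate_cons, List.filter_cons, h, if_pos, if_neg,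
        Bool.false_eq_true, ite_false, ite_true, List.map_cons, List.mem_cons] at hb
    · rcases hb with h' | h'
      · omega
      · have := h2 (by simpa [pvSepsFrom] using h'); omega
    · have := h2 (by simpa [pvSepsFrom] using hb); omega

theorem pvSegsB_eq_pvZS (lines : List String) :
    pvSegsB lines = pvZS lines ((-1 : Int) :: (pvSepsFrom lines 0 ++ [(lines.length : Int)])) := rfl

theorem pvSepsFrom_cons (l : String) (ls : List String) :
    pvSepsFrom (l :: ls) 0 =
      (if pvSep l then [(0 : Int)] else []) ++ (pvSepsFrom ls 0).map (· + 1) := by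
  have h1 : pvSepsFrom ls 1 = (pvSepsFrom ls 0).map (· + 1) := by
    simpa using pvSepsFrom_shift ls 0
  by_cases hs : pvSep l
  · rw [if_pos hs]
    simp only [pvSep] at hs
    simp only [pvSepsFrom, PySem.List.enumerate_cons, List.filter_cons, hs, ite_true,
      List.map_cons, List.singleton_append]
    rw [show ((0:Int) + 1) = 1 by norm_num]
    simpa [pvSepsFrom] using h1
  · rw [if_neg hs]
    simp only [pvSep] at hs
    rw [Bool.not_eq_true] at hs
    simp only [pvSepsFrom, PySem.List.enumerate_cons, List.filter_cons, hs,
      Bool.false_eq_true, ite_false, List.nil_append]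
    rw [show ((0:Int) + 1) = 1 by norm_num]
    simpa [pvSepsFrom] using h1

theorem pvSegsB_cons_sep (l : String) (ls : List String) (hs : pvSep l = true) :
    pvSegsB (l :: ls) = [] :: pvSegsB ls := by
  rw [pvSegsB_eq_pvZS, pvSegsB_eq_pvZS, pvSepsFrom_cons, hs]
  have hmap : ((0 : Int) :: ((pvSepsFrom ls 0).map (· + 1) ++ [((l :: ls).length : Int)])) =
      (((-1 : Int) :: (pvSepsFrom ls 0 ++ [(ls.length : Int)])).map (· + 1)) := by
    simp
  have hge := pvSepsFrom_ge ls 0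
  have hshift : pvZS (l :: ls)
      ((((-1 : Int) :: (pvSepsFrom ls 0 ++ [(ls.length : Int)])).map (· + 1))) =
      pvZS ls ((-1 : Int) :: (pvSepsFrom ls 0 ++ [(ls.length : Int)])) := by
    refine pvZS_shift l ls _ ?_ ?_
    · intro x hx
      rcases List.mem_cons.mp hx with h | h
      · omega
      · rcases List.mem_append.mp h with h' | h'
        · have := hge x h'; omega
        · simp at h'; omega
    · intro x hx
      simp only [List.tail_cons] at hx
      rcases List.mem_append.mp hx with h' | h'
      · exact hge x h'
      · simp at h'; omega
  calc pvZS (l :: ls) ((-1 : Int) :: (([(0 : Int)] ++ (pvSepsFrom ls 0).map (· + 1)) ++ [((l :: ls).length : Int)]))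
      = pvZS (l :: ls) ((-1 : Int) :: (0 : Int) :: ((pvSepsFrom ls 0).map (· + 1) ++ [((l :: ls).length : Int)])) := by
        simp
    _ = PySem.List.slice (l :: ls) (some ((-1 : Int) + 1)) (some 0) ::
          pvZS (l :: ls) ((0 : Int) :: ((pvSepsFrom ls 0).map (· + 1) ++ [((l :: ls).length : Int)])) := pvZS_cons _ _ _ _
    _ = [] :: pvZS ls ((-1 : Int) :: (pvSepsFrom ls 0 ++ [(ls.length : Int)])) := by
        rw [show ((-1 : Int) + 1) = 0 by norm_num, slice_zero_zero, ← hshift, ← hmap]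
    _ = [] :: pvSegsB ls := by rw [← pvSegsB_eq_pvZS]

theorem pvSegsB_cons_nosep (l : String) (ls : List String) (hs : pvSep l = false) :
    pvSegsB (l :: ls) = (pvSegsB ls).modifyHead (List.cons l) := by
  rw [pvSegsB_eq_pvZS, pvSegsB_eq_pvZS, pvSepsFrom_cons, hs]
  have hge := pvSepsFrom_ge ls 0
  obtain ⟨h, t, hht⟩ : ∃ h t, pvSepsFrom ls 0 ++ [(ls.length : Int)] = h :: t := by
    cases hS : pvSepsFrom ls 0 with
    | nil => exact ⟨_, _, rfl⟩
    | cons a r => exact ⟨_, _, rfl⟩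
  have hmem : ∀ x ∈ h :: t, (0:Int) ≤ x := by
    intro x hx
    rw [← hht] at hx
    rcases List.mem_append.mp hx with h' | h'
    · exact hge x h'
    · simp at h'; omega
  have hh0 : (0:Int) ≤ h := hmem h (by simp)
  have hmapped : ((pvSepsFrom ls 0).map (· + 1) ++ [((l :: ls).length : Int)]) =
      (h + 1) :: t.map (· + 1) := by
    have : ((l :: ls).length : Int) = (ls.length : Int) + 1 := by simp
    rw [this, show ((ls.length : Int) + 1) = (fun x => x + 1) (ls.length : Int) from rfl]
    rw [← List.map_singleton (f := fun x : Int => x + 1), ← List.map_append, hht]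
    simp
  have hshift : pvZS (l :: ls) ((h :: t).map (· + 1)) = pvZS ls (h :: t) :=
    pvZS_shift l ls (h :: t) (fun x hx => by have := hmem x hx; omega)
      (fun x hx => hmem x (List.mem_cons_of_mem _ hx))
  simp only [Bool.false_eq_true, ite_false, List.nil_append]
  rw [hmapped, hht, pvZS_cons, pvZS_cons]
  have hmt : ((h + 1) :: t.map (· + 1)) = (h :: t).map (· + 1) := by simp
  rw [hmt, hshift]
  simp only [List.modifyHead]
  rw [show ((-1 : Int) + 1) = 0 by norm_num, slice_zero_succ l ls h hh0]

-- head of dropWhile fails the predicate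
theorem dropWhile_head_false {p : String → Bool} :
    ∀ (ls : List String) (r : String) (rest : List String),
      ls.dropWhile p = r :: rest → p r = false := by
  intro ls
  induction ls with
  | nil => intro r rest h; simp [List.dropWhile] at h
  | cons x xs ih =>
    intro r rest h
    by_cases hx : p x
    · rw [List.dropWhile_cons_of_pos hx] at h; exact ih r rest h
    · rw [List.dropWhile_cons_of_neg hx] at h
      cases h; simpa using hx

-- splitOnP head structure
theorem splitOnP_head (xs : List String) :
    xs.splitOnP pvSep = xs.takeWhile (fun x => !pvSep x) ::
      (match xs.dropWhile (fun x => !pvSep x) with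
       | [] => []
       | _ :: rest => rest.splitOnP pvSep) := by
  induction xs with
  | nil => simp [List.splitOnP_nil]
  | cons l ls ih =>
    by_cases hs : pvSep l
    · simp [List.splitOnP_cons, hs, List.takeWhile_cons, List.dropWhile_cons]
    · rw [List.splitOnP_cons, if_neg (by simp [hs]), ih]
      simp [List.takeWhile_cons, List.dropWhile_cons, hs]

-- filtering out the empty segments of splitOnP yields the non-separator runs
theorem splitOnP_filter_eq_groups : ∀ (n : Nat) (xs : List String), xs.length ≤ n →
    (xs.splitOnP pvSep).filter (fun g => !g.isEmpty) = pvGroups xs := by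
  intro n
  induction n with
  | zero =>
    intro xs hx
    have : xs = [] := List.length_eq_zero_iff.mp (Nat.le_zero.mp hx)
    subst this; simp [List.splitOnP_nil, pvGroups]
  | succ n ih =>
    intro xs hx
    cases xs with
    | nil => simp [List.splitOnP_nil, pvGroups]
    | cons l ls =>
      have hls : ls.length ≤ n := by simpa using hx
      by_cases hs : pvSep l
      · rw [List.splitOnP_cons, if_pos hs]
        simp only [List.filter_cons, List.isEmpty_nil, Bool.not_true]
        rw [ih ls hls]
        simp [pvGroups, hs]
      · rw [List.splitOnP_cons, if_neg (by simp [hs]), splitOnP_head ls]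
        simp only [List.modifyHead]
        have hgroups : pvGroups (l :: ls) =
            (l :: ls.takeWhile (fun x => !pvSep x)) ::
              pvGroups (ls.dropWhile (fun x => !pvSep x)) := by
          simp [pvGroups, hs]
        rw [hgroups]
        simp only [List.filter_cons, List.isEmpty_cons, Bool.not_false, if_pos rfl]
        congr 1
        cases hd : ls.dropWhile (fun x => !pvSep x) with
        | nil => simp [pvGroups]
        | cons r rest =>
          have hr : pvSep r = true := by
            have := dropWhile_head_false (p := fun x => !pvSep x) ls r rest hd
            simpa using this
          have hrest : rest.length ≤ n := by
            have h1 : (ls.dropWhile (fun x => !pvSep x)).length ≤ ls.length :=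
              List.length_dropWhile_le _ _
            rw [hd] at h1; simp at h1; omega
          rw [ih rest hrest]
          simp [pvGroups, hr]

theorem pvSegsB_eq_splitOnP (lines : List String) :
    pvSegsB lines = lines.splitOnP pvSep := by
  induction lines with
  | nil => decide
  | cons l ls ih =>
    by_cases hs : pvSep l
    · rw [pvSegsB_cons_sep l ls hs, List.splitOnP_cons, if_pos hs, ih]
    · rw [pvSegsB_cons_nosep l ls (by simpa using hs), List.splitOnP_cons,
        if_neg (by simp [hs]), ih]

-- the join/strip filter ignores empty segments
theorem filter_pred_eq (ys : List (List String)) :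
    ys.filter (fun g => !(PySem.Str.strip (PySem.Str.join "" g) == "")) =
      (ys.filter (fun g => !g.isEmpty)).filter
        (fun g => !(PySem.Str.strip (PySem.Str.join "" g) == "")) := by
  induction ys with
  | nil => rfl
  | cons y ys ih =>
    cases y with
    | nil =>
      have : (!(PySem.Str.strip (PySem.Str.join "" ([] : List String)) == "")) = false := by decide
      simp [List.filter_cons, this, ih]
    | cons a as =>
      simp only [List.filter_cons, List.isEmpty_cons, Bool.not_false, if_pos rfl]
      by_cases hp : (!(PySem.Str.strip (PySem.Str.join "" (a :: as)) == "")) = true <;>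
        simp [hp, ih]

-- ===== VERDICT =====
theorem split_markdown_by_dash_py_spec : Claim_equal_split_markdown_by_dash_py := by
  intro text _
  unfold Spec_split_markdown_by_dash_py split_markdown_by_dash_py split_markdown_by_dash_py_alt
  dsimp only
  set lines := PySem.Str.splitlines text with hlines
  have hA : pvLoopA lines [] [] = pvGroups lines := pvLoopA_nil_nil lines
  have hB : (pvSegsB lines).filter (fun g => !g.isEmpty) = pvGroups lines := by
    rw [pvSegsB_eq_splitOnP]
    exact splitOnP_filter_eq_groups lines.length lines le_rfl
  have hcond : ((pvSegsB lines).all (fun seg => seg.isEmpty) = true) ↔ pvGroups lines = [] := by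
    rw [← hB, List.filter_eq_nil_iff, List.all_eq_true]
    constructor
    · intro h g hg; simpa using h g hg
    · intro h g hg; simpa using h g hg
  by_cases hc : pvGroups lines = []
  · rw [hA, if_pos hc, if_pos (hcond.mpr hc)]
  · rw [hA, if_neg hc, if_neg (fun hh => hc (hcond.mp hh))]
    conv_rhs => rw [filter_pred_eq (pvSegsB lines)]
    rw [hB]
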